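-- pv_equiv track=rewrite | github.com/liz1czapla3955/csvwrangler | csvwrangler/interleaver.py | interleave_rows
-- ===== SOURCE A (Python) =====
-- from itertools import zip_longest
-- from typing import Iterator, List, Optional
--
-- def interleave_rows(
--     rows_a: List[dict],
--     rows_b: List[dict],
--     fill: bool = False,
--     fill_value: str = "",
-- ) -> List[dict]:
--     """Interleave two sequences of rows, alternating A then B.
--
--     Both row sequences must share the same fieldnames.
--
--     Args:
--         rows_a: First sequence of rows.
--         rows_b: Second sequence of rows.
--         fill: If True, continue with remaining rows when one source is exhausted.
--         fill_value: Value used to fill missing fields when sources differ in length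
--                     and *fill* is True.
--
--     Returns:
--         Interleaved list of rows.
--     """
--     if not rows_a and not rows_b:
--         return []
--
--     result: List[dict] = []
--
--     if fill:
--         # Determine unified fieldnames
--         fields_a = list(rows_a[0].keys()) if rows_a else []
--         fields_b = list(rows_b[0].keys()) if rows_b else []
--         all_fields = fields_a or fields_b
--
--         for row_a, row_b in zip_longest(rows_a, rows_b):
--             if row_a is not None:
--                 result.append(row_a)
--             else:
--                 result.append({f: fill_value for f in all_fields})
--             if row_b is not None:
--                 result.append(row_b)
--             else:
--                 result.append({f: fill_value for f in all_fields})
--     else: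
--         for row_a, row_b in zip(rows_a, rows_b):
--             result.append(row_a)
--             result.append(row_b)
--
--     return result
-- ===== SOURCE B (Python) =====
-- def interleave_rows(rows_a, rows_b, fill=False, fill_value=""):
--     """Staged: first normalize both sources to the same length (pad with fresh
--     blank rows, or truncate), then build the interleaved output at once by
--     preallocating a list of length 2*k and filling the even/odd positions
--     with two strided slice assignments -- no interleaving loop."""
--     if fill:
--         fields = (list(rows_a[0].keys()) if rows_a else []) or \
--                  (list(rows_b[0].keys()) if rows_b else [])
--         k = max(len(rows_a), len(rows_b))
--         pa = rows_a + [dict.fromkeys(fields, fill_value) for _ in range(k - len(rows_a))]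
--         pb = rows_b + [dict.fromkeys(fields, fill_value) for _ in range(k - len(rows_b))]
--     else:
--         k = min(len(rows_a), len(rows_b))
--         pa, pb = rows_a[:k], rows_b[:k]
--     result = [None] * (2 * k)
--     result[0::2] = pa
--     result[1::2] = pb
--     return result
-- ===== Notes on version B (the rewrite author's own statement) =====
-- stated objective: alternative
-- what changed: Replaces A's single interleaving loop with two-branch zip/zip_longest by a staged construction: first pad (with fresh blank rows) or truncate both sources to a common length k, then preallocate a list of length 2*k and place the two sources with strided slice assignments result[0::2]/result[1::2] -- no per-pair loop or None checks.
import Mathlib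
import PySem

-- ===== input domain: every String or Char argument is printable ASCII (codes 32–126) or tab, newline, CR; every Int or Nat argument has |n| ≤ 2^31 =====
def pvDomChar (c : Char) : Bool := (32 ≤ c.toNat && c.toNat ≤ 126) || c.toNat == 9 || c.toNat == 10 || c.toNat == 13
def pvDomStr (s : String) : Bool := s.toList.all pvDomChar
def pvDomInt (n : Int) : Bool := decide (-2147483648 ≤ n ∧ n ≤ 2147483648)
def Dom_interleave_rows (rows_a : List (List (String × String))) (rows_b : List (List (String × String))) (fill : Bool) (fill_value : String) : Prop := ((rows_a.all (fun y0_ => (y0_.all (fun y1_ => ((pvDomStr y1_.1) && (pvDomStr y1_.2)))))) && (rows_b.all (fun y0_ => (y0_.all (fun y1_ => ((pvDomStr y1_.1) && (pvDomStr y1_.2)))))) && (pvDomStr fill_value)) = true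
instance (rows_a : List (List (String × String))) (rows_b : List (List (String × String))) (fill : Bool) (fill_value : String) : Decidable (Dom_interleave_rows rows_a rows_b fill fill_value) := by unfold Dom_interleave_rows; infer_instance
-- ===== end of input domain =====

-- B replaces A's interleaving loop over zip/zip_longest by a staged construction
-- (pad or truncate both sources to length k, then fill a preallocated 2*k list by
-- even/odd position); an alternative decomposition, same cost; return values proved equal.

-- ===== PORT A =====
-- 'list(rows[0].keys()) if rows else []'
def pvFields (rows : List (List (String × String))) : List String :=
  match rows with | [] => [] | r :: _ => r.map Prod.fst

-- '{f: fill_value for f in all_fields}' — a fresh dict built from the field names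
def pvBlank (fields : List String) (fv : String) : List (String × String) :=
  (fields.foldl (fun d f => d.insert f fv) (PySem.Dict.empty : PySem.Dict String String)).items

-- 'x if x is not None else blank'
def pvOr {α : Type} (o : Option α) (blank : α) : α :=
  match o with | some r => r | none => blank

-- itertools.zip_longest(xs, ys) with the default fillvalue None
def pvZipLongest {α β : Type} : List α → List β → List (Option α × Option β)
  | [], [] => []
  | a :: as, [] => (some a, none) :: pvZipLongest as []
  | [], b :: bs => (none, some b) :: pvZipLongest [] bs
  | a :: as, b :: bs => (some a, some b) :: pvZipLongest as bs

def interleave_rows (rows_a : List (List (String × String))) (rows_b : List (List (String × String))) (fill : Bool) (fill_value : String) : List (List (String × String)) :=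
  if rows_a = [] ∧ rows_b = [] then []
  else if fill then
    let fields_a := pvFields rows_a
    let fields_b := pvFields rows_b
    let all_fields := if fields_a = [] then fields_b else fields_a   -- 'fields_a or fields_b'
    (pvZipLongest rows_a rows_b).foldl (fun res p =>
      (res ++ [pvOr p.1 (pvBlank all_fields fill_value)])
        ++ [pvOr p.2 (pvBlank all_fields fill_value)]) []
  else
    (rows_a.zip rows_b).foldl (fun res p => (res ++ [p.1]) ++ [p.2]) []

-- ===== PORT B =====
-- B's 'dict.fromkeys(fields, fill_value)' builds the same blank dict as A's
-- comprehension (first-occurrence key order): reuse pvBlank.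
def interleave_rows_alt (rows_a : List (List (String × String))) (rows_b : List (List (String × String))) (fill : Bool) (fill_value : String) : List (List (String × String)) :=
  let la := rows_a.length
  let lb := rows_b.length
  let kpapb :=
    if fill then
      let fa := match rows_a with | [] => [] | r :: _ => r.map Prod.fst
      let fb := match rows_b with | [] => [] | r :: _ => r.map Prod.fst
      let fields := if fa = [] then fb else fa        -- 'fa or fb'
      let k := max la lb
      (k, rows_a ++ (List.range (k - la)).map (fun _ => pvBlank fields fill_value),
          rows_b ++ (List.range (k - lb)).map (fun _ => pvBlank fields fill_value))
    else
      (min la lb, rows_a.take (min la lb), rows_b.take (min la lb))   -- rows[:k]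
  -- 'result = [None]*(2*k); result[0::2] = pa; result[1::2] = pb' ported exactly
  -- by its meaning: position i holds pa[i/2] if i even, else pb[i/2]
  (List.range (2 * kpapb.1)).map (fun i =>
    if i % 2 = 0 then kpapb.2.1.getD (i / 2) [] else kpapb.2.2.getD (i / 2) [])

-- ===== PRECONDITION & SPEC =====
def Spec_interleave_rows (rows_a : List (List (String × String))) (rows_b : List (List (String × String))) (fill : Bool) (fill_value : String) (out : List (List (String × String))) : Prop := out = interleave_rows_alt rows_a rows_b fill fill_value
instance (rows_a : List (List (String × String))) (rows_b : List (List (String × String))) (fill : Bool) (fill_value : String) (out : List (List (String × String))) : Decidable (Spec_interleave_rows rows_a rows_b fill fill_value out) := by unfold Spec_interleave_rows; infer_instance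

-- ===== CLAIM (what is proved, stated in full; the proofs are below) =====
def Claim_equal_interleave_rows : Prop := ∀ (rows_a : List (List (String × String))) (rows_b : List (List (String × String))) (fill : Bool) (fill_value : String), Dom_interleave_rows rows_a rows_b fill fill_value → Spec_interleave_rows rows_a rows_b fill fill_value (interleave_rows rows_a rows_b fill fill_value)

-- ===== LEMMAS AND PROOFS =====

-- A's loop appends two singletons per element: expose it as a flatMap
theorem pv_foldl_two {γ R : Type} (f g : γ → R) :
    ∀ (l : List γ) (acc : List R),
      l.foldl (fun res p => (res ++ [f p]) ++ [g p]) acc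
        = acc ++ l.flatMap (fun p => [f p, g p]) := by
  intro l
  induction l with
  | nil => simp
  | cons x xs ih => intro acc; rw [List.foldl_cons, ih]; simp [List.flatMap]

-- '(List.range m).map (fun _ => c)' is a replicate
theorem pv_range_const {R : Type} (c : R) (m : Nat) :
    (List.range m).map (fun _ => c) = List.replicate m c := by
  induction m with
  | zero => simp
  | succ n ih => rw [List.range_succ, List.map_append, ih]; simp [List.replicate_succ']

-- B's parity-indexed range over two equal-length lists is the interleaving
theorem pv_parity_eq {R : Type} (d : R) :
    ∀ (pa pb : List R), pa.length = pb.length →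
      (List.range (2 * pa.length)).map (fun i =>
          if i % 2 = 0 then pa.getD (i / 2) d else pb.getD (i / 2) d)
        = (pa.zip pb).flatMap (fun p => [p.1, p.2]) := by
  intro pa
  induction pa with
  | nil => intro pb h; simp
  | cons x xs ih =>
    intro pb h
    cases pb with
    | nil => simp at h
    | cons y ys =>
      simp only [List.length_cons] at h ⊢
      have hr : List.range (2 * (xs.length + 1))
          = 0 :: 1 :: (List.range (2 * xs.length)).map (fun i => i + 2) := by
        have h2 : 2 * (xs.length + 1) = (2 * xs.length + 1) + 1 := by omega
        rw [h2, List.range_succ_eq_map, List.range_succ_eq_map]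
        simp [List.map_map, Function.comp]
      rw [hr]
      simp only [List.map_cons, List.map_map]
      have hfun : ((fun i => if i % 2 = 0 then (x :: xs).getD (i / 2) d
                        else (y :: ys).getD (i / 2) d) ∘ (fun i => i + 2))
           = fun i => if i % 2 = 0 then xs.getD (i / 2) d else ys.getD (i / 2) d := by
        funext i
        have hm : (i + 2) % 2 = i % 2 := by omega
        have hd : (i + 2) / 2 = i / 2 + 1 := by omega
        simp [Function.comp, hm, hd]
      rw [hfun, ih ys (by omega)]
      simp

-- padding with blanks turns zip_longest into a plain zip
theorem pv_pad_eq {R : Type} (blank : R) :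
    ∀ (as bs : List R),
      ((as ++ List.replicate (max as.length bs.length - as.length) blank).zip
       (bs ++ List.replicate (max as.length bs.length - bs.length) blank)).flatMap
          (fun p => [p.1, p.2])
        = (pvZipLongest as bs).flatMap (fun p => [pvOr p.1 blank, pvOr p.2 blank]) := by
  intro as
  induction as with
  | nil =>
    intro bs
    induction bs with
    | nil => simp [pvZipLongest]
    | cons b bs ihb =>
      have h1 : max ([] : List R).length (b :: bs).length - ([] : List R).length
          = bs.length + 1 := by simp
      have h2 : max ([] : List R).length (b :: bs).length - (b :: bs).length = 0 := by simp
      rw [h1, h2, List.replicate_succ, List.replicate_zero, List.append_nil,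
        List.nil_append, List.zip_cons_cons, List.flatMap_cons]
      have ihb' : ((List.replicate bs.length blank).zip bs).flatMap (fun p => [p.1, p.2])
          = (pvZipLongest ([] : List R) bs).flatMap
              (fun p => [pvOr p.1 blank, pvOr p.2 blank]) := by
        simpa using ihb
      rw [pvZipLongest, List.flatMap_cons, ihb']
      rfl
  | cons a as iha =>
    intro bs
    cases bs with
    | nil =>
      have h1 : max (a :: as).length ([] : List R).length - (a :: as).length = 0 := by simp
      have h2 : max (a :: as).length ([] : List R).length - ([] : List R).length
          = as.length + 1 := by simp
      rw [h1, h2, List.replicate_succ, List.replicate_zero, List.append_nil,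
        List.nil_append, List.zip_cons_cons, List.flatMap_cons]
      have iha' : (as.zip (List.replicate as.length blank)).flatMap (fun p => [p.1, p.2])
          = (pvZipLongest as ([] : List R)).flatMap
              (fun p => [pvOr p.1 blank, pvOr p.2 blank]) := by
        simpa using iha []
      rw [pvZipLongest, List.flatMap_cons, iha']
      rfl
    | cons b bs =>
      have h1 : max (a :: as).length (b :: bs).length - (a :: as).length
          = max as.length bs.length - as.length := by simp
      have h2 : max (a :: as).length (b :: bs).length - (b :: bs).length
          = max as.length bs.length - bs.length := by simp
      rw [h1, h2, List.cons_append, List.cons_append, List.zip_cons_cons,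
        List.flatMap_cons, iha bs, pvZipLongest, List.flatMap_cons]
      rfl

-- truncating to the min length leaves the zip unchanged
theorem pv_take_zip {R : Type} :
    ∀ (as bs : List R),
      (as.take (min as.length bs.length)).zip (bs.take (min as.length bs.length))
        = as.zip bs := by
  intro as
  induction as with
  | nil => intro bs; simp
  | cons a as iha =>
    intro bs
    cases bs with
    | nil => simp
    | cons b bs =>
      have h : min (a :: as).length (b :: bs).length = (min as.length bs.length) + 1 := by
        simp [Nat.succ_min_succ]
      rw [h, List.take_succ_cons, List.take_succ_cons, List.zip_cons_cons, iha bs]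
      rfl

-- B's fill branch in canonical form
theorem pv_main_true {R : Type} (blank : R) (d : R) (as bs : List R) :
    (List.range (2 * max as.length bs.length)).map (fun i =>
        if i % 2 = 0 then
          (as ++ List.replicate (max as.length bs.length - as.length) blank).getD (i / 2) d
        else
          (bs ++ List.replicate (max as.length bs.length - bs.length) blank).getD (i / 2) d)
      = (pvZipLongest as bs).flatMap (fun p => [pvOr p.1 blank, pvOr p.2 blank]) := by
  have hla : (as ++ List.replicate (max as.length bs.length - as.length) blank).length
      = max as.length bs.length := by simp
  have hlb : (bs ++ List.replicate (max as.length bs.length - bs.length) blank).length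
      = max as.length bs.length := by simp
  rw [← pv_pad_eq blank as bs, ← pv_parity_eq d _ _ (hla.trans hlb.symm), hla]

-- B's no-fill branch in canonical form
theorem pv_main_false {R : Type} (d : R) (as bs : List R) :
    (List.range (2 * min as.length bs.length)).map (fun i =>
        if i % 2 = 0 then (as.take (min as.length bs.length)).getD (i / 2) d
        else (bs.take (min as.length bs.length)).getD (i / 2) d)
      = (as.zip bs).flatMap (fun p => [p.1, p.2]) := by
  have hla : (as.take (min as.length bs.length)).length = min as.length bs.length := by simp
  have hlb : (bs.take (min as.length bs.length)).length = min as.length bs.length := by simp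
  rw [← pv_take_zip as bs, ← pv_parity_eq d _ _ (hla.trans hlb.symm), hla]

-- ===== VERDICT (by name: the statement is the Claim_ definition above) =====
theorem interleave_rows_spec : Claim_equal_interleave_rows := by
  intro rows_a rows_b fill fill_value _
  unfold Spec_interleave_rows interleave_rows interleave_rows_alt
  by_cases hz : rows_a = [] ∧ rows_b = []
  · obtain ⟨ha, hb⟩ := hz
    subst ha; subst hb
    cases fill <;> rfl
  · simp only [hz, if_false]
    cases fill with
    | false =>
      simp only [Bool.false_eq_true, if_false]
      rw [pv_foldl_two]
      simp only [List.nil_append]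
      exact (pv_main_false ([] : List (String × String)) rows_a rows_b).symm
    | true =>
      simp only [if_pos]
      rw [pv_foldl_two]
      simp only [List.nil_append]
      simp only [pv_range_const]
      exact (pv_main_true
        (pvBlank (if pvFields rows_a = [] then pvFields rows_b else pvFields rows_a) fill_value)
        ([] : List (String × String)) rows_a rows_b).symm
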